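-- pv_equiv track=rewrite | github.com/acbennett89/Automated-New-Business-Report | Scripts/written_business_ytd.py | ordered_departments
-- ===== SOURCE A (Python) =====
-- from typing import Dict, Iterable
--
-- PRIMARY_DEPARTMENTS = ["Commercial", "Surety", "Employee Benefits", "Personal Lines"]
--
-- def ordered_departments(departments: Iterable[str]) -> list[str]:
--     normalized = {str(d).strip(): d for d in departments if str(d).strip()}
--     ordered: list[str] = []
--     for dep in PRIMARY_DEPARTMENTS:
--         if dep in normalized:
--             ordered.append(dep)
--     for dep in sorted(normalized.keys()):
--         if dep not in ordered:
--             ordered.append(dep)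
--     return ordered
-- ===== SOURCE B (Python) =====
-- PRIMARY_DEPARTMENTS = ["Commercial", "Surety", "Employee Benefits", "Personal Lines"]
--
-- def ordered_departments(departments):
--     seen = {}
--     for d in departments:
--         key = str(d).strip()
--         if key:
--             seen[key] = d
--     def rank(dep):
--         if dep in PRIMARY_DEPARTMENTS:
--             return (PRIMARY_DEPARTMENTS.index(dep), "")
--         return (len(PRIMARY_DEPARTMENTS), dep)
--     return sorted(seen, key=rank)
-- ===== Notes on version B (the rewrite author's own statement) =====
-- stated objective: simpler
-- what changed: Replaces A's two population loops (primaries-membership scan, then a sorted-keys scan guarded by a 'dep not in ordered' list check) by a single keyed sort of the normalized keys with key (index-in-primaries, '') for primaries and (len(primaries), name) for the rest.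
import Mathlib
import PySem

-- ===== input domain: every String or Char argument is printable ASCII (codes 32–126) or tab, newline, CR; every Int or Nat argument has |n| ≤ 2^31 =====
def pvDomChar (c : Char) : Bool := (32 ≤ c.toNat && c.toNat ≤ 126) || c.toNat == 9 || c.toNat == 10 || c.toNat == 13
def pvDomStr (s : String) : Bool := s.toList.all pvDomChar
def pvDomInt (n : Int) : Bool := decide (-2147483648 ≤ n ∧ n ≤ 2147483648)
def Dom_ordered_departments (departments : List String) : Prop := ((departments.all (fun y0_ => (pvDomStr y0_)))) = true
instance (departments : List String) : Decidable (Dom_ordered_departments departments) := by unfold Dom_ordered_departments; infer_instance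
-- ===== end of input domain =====

-- B replaces A's two population loops by one keyed sort of the normalized keys (objective: simpler).

def PRIMARY_DEPARTMENTS : List String := ["Commercial", "Surety", "Employee Benefits", "Personal Lines"]

-- ===== PORT A =====
def ordered_departments (departments : List String) : List String :=
  let normalized : PySem.Dict String String :=
    departments.foldl
      (fun acc d => if PySem.Str.strip d == "" then acc else acc.insert (PySem.Str.strip d) d)
      PySem.Dict.empty
  let ordered₁ : List String :=
    PRIMARY_DEPARTMENTS.foldl (fun acc dep => if normalized.contains dep then acc ++ [dep] else acc) []
  (PySem.List.sorted normalized.keys (fun x => x)).foldl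
    (fun acc dep => if acc.contains dep then acc else acc ++ [dep]) ordered₁

-- ===== PORT B =====
def pvRank1 (dep : String) : Int :=
  if PRIMARY_DEPARTMENTS.contains dep then ((PySem.List.index? PRIMARY_DEPARTMENTS dep).getD 0 : Nat)
  else (PRIMARY_DEPARTMENTS.length : Int)

def pvRank2 (dep : String) : String :=
  if PRIMARY_DEPARTMENTS.contains dep then "" else dep

def ordered_departments_alt (departments : List String) : List String :=
  let seen : PySem.Dict String String :=
    departments.foldl
      (fun acc d => if PySem.Str.strip d == "" then acc else acc.insert (PySem.Str.strip d) d)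
      PySem.Dict.empty
  PySem.List.sorted2 seen.keys pvRank1 pvRank2

-- ===== PRECONDITION & SPEC =====
def Spec_ordered_departments (departments : List String) (out : List String) : Prop := out = ordered_departments_alt departments
instance (departments : List String) (out : List String) : Decidable (Spec_ordered_departments departments out) := by unfold Spec_ordered_departments; infer_instance

-- ===== CLAIM (what is proved, stated in full; the proofs are below) =====
def Claim_equal_ordered_departments : Prop := ∀ (departments : List String), Dom_ordered_departments departments → Spec_ordered_departments departments (ordered_departments departments)

-- ===== LEMMAS AND PROOFS =====

lemma pvNorm_aux (l : List String) (d : PySem.Dict String String) (h : d.keys.Nodup) :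
    (l.foldl (fun acc x => if PySem.Str.strip x == "" then acc else acc.insert (PySem.Str.strip x) x) d).keys.Nodup := by
  induction l generalizing d with
  | nil => exact h
  | cons x t ih =>
    simp only [List.foldl_cons]
    split
    · exact ih d h
    · exact ih _ (PySem.Dict.nodup_keys_insert d _ x h)

lemma pv_dedup_fold (S init : List String) (h : S.Nodup) :
    S.foldl (fun acc dep => if acc.contains dep then acc else acc ++ [dep]) init
      = init ++ S.filter (fun d => !init.contains d) := by
  induction S generalizing init with
  | nil => simp
  | cons d t ih =>
    simp only [List.nodup_cons] at h
    obtain ⟨hdt, hnd⟩ := h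
    simp only [List.foldl_cons, List.filter_cons]
    by_cases hd : init.contains d = true
    · rw [if_pos hd, ih init hnd]
      have hb : (!init.contains d) = false := by simp_all
      rw [hb]; simp
    · rw [if_neg hd, ih (init ++ [d]) hnd]
      have hb : (!init.contains d) = true := by simp_all
      rw [hb]; simp only [reduceIte]
      rw [List.append_assoc, List.singleton_append]
      congr 1
      congr 1
      apply List.filter_congr
      intro x hx
      have hxd : x ≠ d := fun he => hdt (he ▸ hx)
      simp [hxd]

lemma pv_before_eq :
    (fun a b => decide (pvRank1 a < pvRank1 b) || (!decide (pvRank1 b < pvRank1 a) && decide (pvRank2 a < pvRank2 b)))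
      = (fun a b : String => decide (toLex (pvRank1 a, pvRank2 a) < toLex (pvRank1 b, pvRank2 b))) := by
  funext a b
  rw [Bool.eq_iff_iff]
  simp only [Bool.or_eq_true, Bool.and_eq_true, Bool.not_eq_true', decide_eq_true_eq,
    decide_eq_false_iff_not]
  simp only [Prod.Lex.lt_iff, ofLex_toLex]
  constructor
  · rintro (h | ⟨h1, h2⟩)
    · exact Or.inl h
    · rcases (not_lt.mp h1).lt_or_eq with h' | h'
      · exact Or.inl h'
      · exact Or.inr ⟨h', h2⟩
  · rintro (h | ⟨h1, h2⟩)
    · exact Or.inl h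
    · exact Or.inr ⟨by rw [h1]; exact lt_irrefl _, h2⟩

lemma pv_sorted2_eq (xs : List String) :
    PySem.List.sorted2 xs pvRank1 pvRank2
      = PySem.List.sorted xs (fun d => toLex (pvRank1 d, pvRank2 d)) := by
  rw [PySem.List.sorted_eq_foldl_insertBy]
  unfold PySem.List.sorted2
  simp only [Bool.false_eq_true, if_false]
  rw [pv_before_eq]

lemma pv_rank1_lt (a : String) (ha : a ∈ PRIMARY_DEPARTMENTS) : pvRank1 a < 4 := by
  fin_cases ha <;> decide

lemma pv_rank1_not_mem (a : String) (ha : ¬ a ∈ PRIMARY_DEPARTMENTS) : pvRank1 a = 4 := by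
  simp [pvRank1, ha]
  decide

lemma pv_rank2_not_mem (a : String) (ha : ¬ a ∈ PRIMARY_DEPARTMENTS) : pvRank2 a = a := by
  simp [pvRank2, ha]

lemma pv_b_eq (K : List String) (hK : K.Nodup) :
    PySem.List.sorted2 K pvRank1 pvRank2
      = PRIMARY_DEPARTMENTS.filter (fun dep => K.contains dep)
        ++ (PySem.List.sorted K (fun x => x)).filter (fun d => !PRIMARY_DEPARTMENTS.contains d) := by
  rw [pv_sorted2_eq]
  apply PySem.List.sorted_eq_of_perm_of_pairwise_lt
  · -- Perm
    have h1 : (PRIMARY_DEPARTMENTS.filter (fun dep => K.contains dep)).Perm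
        (K.filter (fun d => PRIMARY_DEPARTMENTS.contains d)) := by
      rw [List.perm_ext_iff_of_nodup (List.Nodup.filter _ (by decide)) (List.Nodup.filter _ hK)]
      intro a
      simp only [List.mem_filter, List.contains_eq_mem, decide_eq_true_eq]
      exact and_comm
    have h2 : ((PySem.List.sorted K (fun x => x)).filter (fun d => !PRIMARY_DEPARTMENTS.contains d)).Perm
        (K.filter (fun d => !PRIMARY_DEPARTMENTS.contains d)) :=
      (PySem.List.sorted_perm K (fun x => x) false).filter _
    exact (h1.append h2).trans (List.filter_append_perm _ K)
  · -- Pairwise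
    rw [List.pairwise_append]
    have hS : (PySem.List.sorted K (fun x => x)).Nodup :=
      ((PySem.List.sorted_perm K (fun x => x) false).symm).nodup hK
    refine ⟨?_, ?_, ?_⟩
    · apply List.Pairwise.sublist List.filter_sublist
      decide
    · have hle := PySem.List.sorted_pairwise K (fun x => x)
      have hcomb := hle.and hS
      have hf := hcomb.sublist (List.filter_sublist (p := fun d => !PRIMARY_DEPARTMENTS.contains d))
      apply hf.imp_of_mem
      intro a b ha hb hab
      have ha' : ¬ a ∈ PRIMARY_DEPARTMENTS := by
        have := (List.mem_filter.mp ha).2; simpa using this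
      have hb' : ¬ b ∈ PRIMARY_DEPARTMENTS := by
        have := (List.mem_filter.mp hb).2; simpa using this
      rw [Prod.Lex.lt_iff]
      right
      simp only [ofLex_toLex]
      exact ⟨by rw [pv_rank1_not_mem a ha', pv_rank1_not_mem b hb'],
        by rw [pv_rank2_not_mem a ha', pv_rank2_not_mem b hb']; exact lt_of_le_of_ne hab.1 hab.2⟩
    · intro a ha b hb
      have ha' : a ∈ PRIMARY_DEPARTMENTS := (List.mem_filter.mp ha).1
      have hb' : ¬ b ∈ PRIMARY_DEPARTMENTS := by
        have := (List.mem_filter.mp hb).2; simpa using this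
      rw [Prod.Lex.lt_iff]
      left
      simp only [ofLex_toLex]
      rw [pv_rank1_not_mem b hb']
      exact pv_rank1_lt a ha'

lemma pv_a_eq (K : List String) (hK : K.Nodup) :
    (PySem.List.sorted K (fun x => x)).foldl
        (fun acc dep => if acc.contains dep then acc else acc ++ [dep])
        (PRIMARY_DEPARTMENTS.foldl (fun acc dep => if K.contains dep then acc ++ [dep] else acc) [])
      = PRIMARY_DEPARTMENTS.filter (fun dep => K.contains dep)
        ++ (PySem.List.sorted K (fun x => x)).filter (fun d => !PRIMARY_DEPARTMENTS.contains d) := by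
  rw [PySem.List.foldl_append_if_eq_filter, List.nil_append]
  have hS : (PySem.List.sorted K (fun x => x)).Nodup :=
    ((PySem.List.sorted_perm K (fun x => x) false).symm).nodup hK
  rw [pv_dedup_fold _ _ hS]
  congr 1
  apply List.filter_congr
  intro x hx
  have hxK : x ∈ K := (PySem.List.sorted_perm K (fun x => x) false).mem_iff.mp hx
  congr 1
  rw [Bool.eq_iff_iff]
  simp [List.mem_filter, hxK]

-- ===== VERDICT (by name: the statement is the Claim_ definition above) =====
theorem ordered_departments_spec : Claim_equal_ordered_departments := by
  intro departments _
  show ordered_departments departments = ordered_departments_alt departments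
  simp only [ordered_departments, ordered_departments_alt]
  have hnd : (departments.foldl
      (fun acc d => if PySem.Str.strip d == "" then acc else acc.insert (PySem.Str.strip d) d)
      PySem.Dict.empty).keys.Nodup :=
    pvNorm_aux departments PySem.Dict.empty PySem.Dict.nodup_keys_empty
  have hc : ∀ dep, (departments.foldl
      (fun acc d => if PySem.Str.strip d == "" then acc else acc.insert (PySem.Str.strip d) d)
      PySem.Dict.empty).contains dep
      = ((departments.foldl
      (fun acc d => if PySem.Str.strip d == "" then acc else acc.insert (PySem.Str.strip d) d)
      PySem.Dict.empty).keys).contains dep := by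
    intro dep
    rw [PySem.Dict.contains_eq_decide_mem_keys, List.contains_eq_mem]
  simp only [hc]
  rw [pv_a_eq _ hnd, pv_b_eq _ hnd]
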